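-- pv_equiv track=rewrite | github.com/MNico99/Sintaxis-TP02 | automatas.py | A_Coma
-- ===== SOURCE A (Python) =====
-- TRAMPA = -1
--
-- RESULTADO_ACEPTADO = "ACEPTADO"
--
-- RESULTADO_TRAMPA = "TRAMPA"
--
-- RESULTADO_NO_ACEPTADO = "NO_ACEPTADO"
--
-- def d_Coma(estado_anterior, caracter):
--     if estado_anterior == 0 and caracter == ",":
--         return 1
--
--     return TRAMPA
--
-- def A_Coma(cadena):
--     Finales = [1]
--     estado_actual = 0
--
--     for caracter in cadena:
--         estado_proximo = d_Coma(estado_actual, caracter)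
--         if estado_proximo == TRAMPA:
--             return RESULTADO_TRAMPA
--         estado_actual = estado_proximo
--
--     if estado_actual in Finales:
--         return RESULTADO_ACEPTADO
--     else:
--         return RESULTADO_NO_ACEPTADO
-- ===== SOURCE B (Python) =====
-- TRAMPA = -1
-- RESULTADO_ACEPTADO = "ACEPTADO"
-- RESULTADO_TRAMPA = "TRAMPA"
-- RESULTADO_NO_ACEPTADO = "NO_ACEPTADO"
--
-- def A_Coma(cadena):
--     if not cadena:
--         return RESULTADO_NO_ACEPTADO
--     if cadena == ",":
--         return RESULTADO_ACEPTADO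
--     return RESULTADO_TRAMPA
-- ===== Notes on version B (the rewrite author's own statement) =====
-- stated objective: simpler
-- what changed: Replaced the DFA state loop and transition function with three direct whole-string checks (empty, the single accepted string, otherwise trap).
import Mathlib
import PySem

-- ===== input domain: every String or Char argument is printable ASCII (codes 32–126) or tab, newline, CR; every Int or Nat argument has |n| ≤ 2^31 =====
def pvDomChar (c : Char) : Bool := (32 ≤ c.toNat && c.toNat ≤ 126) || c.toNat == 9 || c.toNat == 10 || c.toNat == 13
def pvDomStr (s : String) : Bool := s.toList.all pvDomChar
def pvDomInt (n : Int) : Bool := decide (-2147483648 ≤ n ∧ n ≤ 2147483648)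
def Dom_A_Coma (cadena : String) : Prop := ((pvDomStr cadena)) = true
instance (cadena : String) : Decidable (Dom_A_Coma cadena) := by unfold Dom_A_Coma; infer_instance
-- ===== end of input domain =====

-- Header: B replaces A's DFA state loop with three direct string checks (simpler, same values).
-- ===== PORT A =====
def d_Coma (estado_anterior : Int) (caracter : Char) : Int :=
  if estado_anterior = 0 ∧ caracter = ',' then 1 else (-1)

def aComaLoop (estado_actual : Int) : List Char → String
  | [] => if estado_actual ∈ [(1 : Int)] then "ACEPTADO" else "NO_ACEPTADO"
  | caracter :: rest =>
    let estado_proximo := d_Coma estado_actual caracter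
    if estado_proximo = -1 then "TRAMPA" else aComaLoop estado_proximo rest

def A_Coma (cadena : String) : String := aComaLoop 0 cadena.toList

-- ===== PORT B =====
def A_Coma_alt (cadena : String) : String :=
  if cadena = "" then "NO_ACEPTADO"
  else if cadena = "," then "ACEPTADO"
  else "TRAMPA"

-- ===== PRECONDITION & SPEC =====
def Spec_A_Coma (cadena : String) (out : String) : Prop := out = A_Coma_alt cadena
instance (cadena : String) (out : String) : Decidable (Spec_A_Coma cadena out) := by unfold Spec_A_Coma; infer_instance

-- ===== CLAIM (what is proved, stated in full; the proofs are below) =====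
def Claim_equal_A_Coma : Prop := ∀ (cadena : String), Dom_A_Coma cadena → Spec_A_Coma cadena (A_Coma cadena)

-- ===== LEMMAS AND PROOFS =====

-- ===== VERDICT (by name: the statement is the Claim_ definition above) =====
theorem A_Coma_spec : Claim_equal_A_Coma := by
  intro cadena _
  unfold Spec_A_Coma A_Coma A_Coma_alt
  have e1 : (cadena = "") ↔ cadena.toList = [] := by
    rw [← String.toList_inj]; rfl
  have e2 : (cadena = ",") ↔ cadena.toList = [','] := by
    rw [← String.toList_inj]; rfl
  rcases h : cadena.toList with _ | ⟨c, _ | ⟨d, t⟩⟩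
  · simp [e1, h, aComaLoop]
  · by_cases hc : c = ','
    · subst hc; simp [e1, e2, h, aComaLoop, d_Coma]
    · simp [e1, e2, h, aComaLoop, d_Coma, hc]
  · by_cases hc : c = ','
    · subst hc; simp [e1, e2, h, aComaLoop, d_Coma]
    · simp [e1, e2, h, aComaLoop, d_Coma, hc]
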